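-- pv_equiv track=rewrite | github.com/usrKevin/CoPL | assignment1/main.py | remove_lambda_spaces
-- ===== SOURCE A (Python) =====
-- def remove_lambda_spaces(s:str) -> str:
--     i = 0
--     is_lambda = False
--     l = list(s)
--     while i < len(l):
--         if l[i] == '\\':
--             is_lambda = True
--         elif l[i] == ' ':
--             if is_lambda:
--                 l.pop(i)
--                 continue
--         else:
--             is_lambda = False
--         i += 1
--     return "".join(l)
-- ===== SOURCE B (Python) =====
-- def remove_lambda_spaces(s: str) -> str:
--     # Run-based scan: at each backslash, grab the maximal run of backslashes
--     # and spaces, emit it with the spaces deleted; other chars pass through.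
--     out = []
--     n = len(s)
--     i = 0
--     while i < n:
--         if s[i] == '\\':
--             j = i
--             while j < n and s[j] in '\\ ':
--                 j += 1
--             out.append(s[i:j].replace(' ', ''))
--             i = j
--         else:
--             out.append(s[i])
--             i += 1
--     return ''.join(out)
-- ===== Notes on version B (the rewrite author's own statement) =====
-- stated objective: alternative
-- what changed: Replaced A's mutable index/flag loop that pops spaces out of the list in place by a run-based scan that copies characters and, at each backslash, emits the maximal backslash/space run with its spaces filtered out.
import Mathlib
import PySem

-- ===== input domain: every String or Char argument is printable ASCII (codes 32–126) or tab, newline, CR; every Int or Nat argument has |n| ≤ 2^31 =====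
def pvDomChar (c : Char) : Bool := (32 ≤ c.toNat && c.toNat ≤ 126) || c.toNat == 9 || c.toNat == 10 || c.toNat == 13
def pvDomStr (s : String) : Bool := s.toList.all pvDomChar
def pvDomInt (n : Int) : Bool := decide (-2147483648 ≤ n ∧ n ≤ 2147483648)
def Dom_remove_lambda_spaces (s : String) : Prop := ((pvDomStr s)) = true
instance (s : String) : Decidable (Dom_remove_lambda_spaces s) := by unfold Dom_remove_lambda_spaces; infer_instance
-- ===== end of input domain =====

-- B replaces A's index/flag loop with in-place pop by a linear run-based scan
-- (alternative decomposition; same observable result, no argument mutation).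

-- ===== PORT A =====
-- A's while loop over the mutable list l with index i and flag is_lambda;
-- l.pop(i) at a valid index is exactly List.eraseIdx l i, and l[i] is in range
-- under the guard i < len(l).
def pvALoop (l : List Char) (i : Nat) (is_lambda : Bool) : List Char :=
  if h : i < l.length then
    if l[i] = '\\' then pvALoop l (i+1) true
    else if l[i] = ' ' then
      if is_lambda then pvALoop (l.eraseIdx i) i is_lambda
      else pvALoop l (i+1) is_lambda
    else pvALoop l (i+1) false
  else l
termination_by l.length - i
decreasing_by
  · omega
  · have := List.length_eraseIdx_of_lt (l := l) (i := i) h; omega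
  · omega
  · omega

def remove_lambda_spaces (s : String) : String :=
  String.ofList (pvALoop s.toList 0 false)

-- ===== PORT B =====
-- inner run-taker: the maximal prefix of backslashes/spaces, and the rest
def pvTakeRun : List Char → List Char × List Char
  | [] => ([], [])
  | c :: t =>
    if c = '\\' ∨ c = ' ' then (c :: (pvTakeRun t).1, (pvTakeRun t).2)
    else ([], c :: t)

theorem pvTakeRun_snd_length : ∀ l : List Char, (pvTakeRun l).2.length ≤ l.length := by
  intro l; induction l with
  | nil => simp [pvTakeRun]
  | cons c t ih =>
    simp only [pvTakeRun]
    split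
    · simpa using Nat.le_succ_of_le ih
    · simp

-- outer scan: copy chars until a backslash, then emit its run without spaces
def pvBScan : List Char → List Char
  | [] => []
  | c :: t =>
    if c = '\\' then
      c :: ((pvTakeRun t).1.filter (· ≠ ' ') ++ pvBScan (pvTakeRun t).2)
    else c :: pvBScan t
termination_by l => l.length
decreasing_by
  · have := pvTakeRun_snd_length t; simp only [List.length_cons]; omega
  · simp

def remove_lambda_spaces_alt (s : String) : String :=
  String.ofList (pvBScan s.toList)

-- ===== PRECONDITION & SPEC =====
def Spec_remove_lambda_spaces (s : String) (out : String) : Prop := out = remove_lambda_spaces_alt s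
instance (s : String) (out : String) : Decidable (Spec_remove_lambda_spaces s out) := by unfold Spec_remove_lambda_spaces; infer_instance

-- ===== CLAIM (what is proved, stated in full; the proofs are below) =====
def Claim_equal_remove_lambda_spaces : Prop := ∀ (s : String), Dom_remove_lambda_spaces s → Spec_remove_lambda_spaces s (remove_lambda_spaces s)

-- ===== LEMMAS AND PROOFS =====

-- reference one-pass flag fold both ports are reduced to
def pvFold : Bool → List Char → List Char
  | _, [] => []
  | b, c :: t =>
    if c = '\\' then c :: pvFold true t
    else if c = ' ' then (if b then pvFold b t else c :: pvFold b t)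
    else c :: pvFold false t

-- B equals the fold (strong induction on length, run lemma folded in)
theorem pvB_eq_fold : ∀ n (l : List Char), l.length ≤ n →
    (pvBScan l = pvFold false l ∧
     (pvTakeRun l).1.filter (· ≠ ' ') ++ pvBScan (pvTakeRun l).2 = pvFold true l) := by
  intro n
  induction n with
  | zero =>
    intro l hl
    have : l = [] := List.eq_nil_of_length_eq_zero (Nat.le_zero.mp hl)
    subst this; simp [pvBScan, pvTakeRun, pvFold]
  | succ n ih =>
    intro l hl
    cases l with
    | nil => simp [pvBScan, pvTakeRun, pvFold]
    | cons c t =>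
      have ht : t.length ≤ n := by simpa using Nat.succ_le_succ_iff.mp hl
      obtain ⟨ih1, ih2⟩ := ih t ht
      simp only [ne_eq, decide_not] at ih2
      by_cases hb : c = '\\'
      · subst hb
        refine ⟨?_, ?_⟩
        · simp [pvBScan, pvFold, ih2]
        · simp [pvTakeRun, pvFold, ih2]
      · by_cases hs : c = ' '
        · subst hs
          refine ⟨?_, ?_⟩
          · simp [pvBScan, pvFold, ih1]
          · simp [pvTakeRun, pvFold, ih2]
        · refine ⟨?_, ?_⟩
          · simp [pvBScan, hb, pvFold, hs, ih1]
          · simp [pvTakeRun, pvFold, hb, hs]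
            simp [pvBScan, hb, ih1]

-- A's loop equals take i ++ fold on the suffix
theorem pvA_eq_fold : ∀ (l : List Char) (i : Nat) (b : Bool),
    pvALoop l i b = l.take i ++ pvFold b (l.drop i) := by
  intro l i b
  induction hwf : l.length - i using Nat.strong_induction_on generalizing l i b with
  | _ m ih =>
  subst hwf
  by_cases h : i < l.length
  · have hdrop : l.drop i = l[i] :: l.drop (i+1) := List.drop_eq_getElem_cons h
    have htake : l.take (i+1) = l.take i ++ [l[i]] := by
      rw [List.take_add_one]; simp [List.getElem?_eq_getElem h]
    by_cases hb : l[i] = '\\'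
    · rw [pvALoop]; rw [dif_pos h, if_pos hb]
      rw [ih _ (by omega) _ _ _ rfl, htake, hdrop, hb]
      simp [pvFold]
    · by_cases hs : l[i] = ' '
      · by_cases hl : b = true
        · subst hl
          rw [pvALoop]; rw [dif_pos h, if_neg hb, if_pos hs, if_pos rfl]
          have hlen := List.length_eraseIdx_of_lt (l := l) (i := i) h
          rw [ih _ (by omega) _ _ _ rfl]
          have herase : l.eraseIdx i = l.take i ++ l.drop (i+1) :=
            List.eraseIdx_eq_take_drop_succ l i
          rw [herase]
          have hti : (l.take i).length = i := List.length_take_of_le (Nat.le_of_lt h)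
          rw [List.take_append_of_le_length (by omega), List.drop_append_of_le_length (by omega)]
          simp [hti, hdrop, hs, pvFold]
        · have hbf : b = false := by simpa using hl
          subst hbf
          rw [pvALoop]; rw [dif_pos h, if_neg hb, if_pos hs, if_neg (by simp)]
          rw [ih _ (by omega) _ _ _ rfl, htake, hdrop, hs]
          simp [pvFold]
      · rw [pvALoop]; rw [dif_pos h, if_neg hb, if_neg hs]
        rw [ih _ (by omega) _ _ _ rfl, hdrop]
        simp only [pvFold, hb, hs, if_false]
        rw [htake, List.append_assoc]
        rfl
  · rw [pvALoop, dif_neg h]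
    rw [List.take_of_length_le (by omega), List.drop_of_length_le (by omega)]
    simp [pvFold]

-- ===== VERDICT (by name: the statement is the Claim_ definition above) =====
theorem remove_lambda_spaces_spec : Claim_equal_remove_lambda_spaces := by
  intro s _
  unfold Spec_remove_lambda_spaces remove_lambda_spaces remove_lambda_spaces_alt
  rw [pvA_eq_fold, (pvB_eq_fold s.toList.length s.toList le_rfl).1]
  simp
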